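-- pv_equiv track=rewrite | github.com/aspacek/Retired | Letterboxd-user-film-compare/user_film_compare.py | filmmatch
-- ===== SOURCE A (Python) =====
-- def filmmatch(films1,ratings1,films2,ratings2):
-- 	# Create master lists:
-- 	finalfilms = []
-- 	finalratings1 = []
-- 	finalratings2 = []
-- 	# Start from the shorter list,
-- 	# Find if any films match,
-- 	# Removing finished elements.
-- 	# If films1 list happens to be shorter:
-- 	if len(films1) < len(films2):
-- 		while len(films1) > 0:
-- 			i = 0
-- 			flag = 0
-- 			# Until a match is found or all films are checked, loop through films:
-- 			while flag == 0:
-- 				# If a match is found, record it: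
-- 				if films2[i] == films1[0]:
-- 					flag = 1
-- 					finalfilms = finalfilms+[films1[0]]
-- 					finalratings1 = finalratings1+[ratings1[0]]
-- 					finalratings2 = finalratings2+[ratings2[i]]
-- 					# Film is found, delete it from films2 list:
-- 					del films2[i]
-- 					del ratings2[i]
-- 				# If a match isn't found, check next film:
-- 				else:
-- 					i = i+1
-- 					# If all films checked, no match found:
-- 					if i == len(films2):
-- 						flag = 1
-- 			# Film either matched or not, delete it from films1 list
-- 			del films1[0]
-- 			del ratings1[0]
-- 	# If films2 list happens to be shorter:
-- 	else:
-- 		while len(films2) > 0: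
-- 			i = 0
-- 			flag = 0
-- 			# Until a match is found or all films are checked, loop through films:
-- 			while flag == 0:
-- 				# If a match is found, record it:
-- 				if films1[i] == films2[0]:
-- 					flag = 1
-- 					finalfilms = finalfilms+[films2[0]]
-- 					finalratings1 = finalratings1+[ratings1[i]]
-- 					finalratings2 = finalratings2+[ratings2[0]]
-- 					# Film is found, delete it from films1 list:
-- 					del films1[i]
-- 					del ratings1[i]
-- 				# If a match isn't found, check next film:
-- 				else:
-- 					i = i+1
-- 					if i == len(films1):
-- 						flag = 1
-- 			# Film either matched or not, delete it from films2 list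
-- 			del films2[0]
-- 			del ratings2[0]
-- 	# If no matches at all found:
-- 	if len(finalfilms) == 0 and len(finalratings1) == 0 and len(finalratings2) == 0:
-- 		finalfilms = ['-1']
-- 		finalratings1 = [-1]
-- 		finalratings2 = [-1]
-- 	# Return the results
-- 	return finalfilms,finalratings1,finalratings2
-- ===== SOURCE B (Python) =====
-- def filmmatch(films1, ratings1, films2, ratings2):
--     # Hash-index re-implementation: one pass over each list instead of A's
--     # nested scan-with-deletion. (A empties its argument lists in place; B
--     # does not mutate its arguments -- equivalence is about the return value.)
--     if len(films1) < len(films2):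
--         sf, sr, lf, lr, swap = films1, ratings1, films2, ratings2, False
--     else:
--         sf, sr, lf, lr, swap = films2, ratings2, films1, ratings1, True
--     # film -> queue of its ratings in the longer list, in order
--     queues = {}
--     for film, rating in zip(lf, lr):
--         queues.setdefault(film, []).append(rating)
--     # film -> how many of its queued ratings were already consumed
--     used = {}
--     ff, fs, fl = [], [], []
--     for film, rating in zip(sf, sr):
--         q = queues.get(film, [])
--         u = used.get(film, 0)
--         if u < len(q):
--             used[film] = u + 1
--             ff.append(film)
--             fs.append(rating)
--             fl.append(q[u])
--     if not ff:
--         return ['-1'], [-1], [-1]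
--     return (ff, fl, fs) if swap else (ff, fs, fl)
-- ===== Notes on version B (the rewrite author's own statement) =====
-- stated objective: faster
-- what changed: A repeatedly rescans and mutates the longer list (nested while loops with del) for each film of the shorter list; B builds a hash index film -> queue of ratings in one pass over the longer list and then makes one pass over the shorter list consuming queue entries, with no deletion or rescan (B also leaves the argument lists unmutated, whereas A empties them in place).
-- outside the precondition, e.g. on filmmatch(['a'], [1], ['a', 'a'], [5]): A returns (['a'], [1], [5]), B returns (['a'], [1], [5])
import Mathlib
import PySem

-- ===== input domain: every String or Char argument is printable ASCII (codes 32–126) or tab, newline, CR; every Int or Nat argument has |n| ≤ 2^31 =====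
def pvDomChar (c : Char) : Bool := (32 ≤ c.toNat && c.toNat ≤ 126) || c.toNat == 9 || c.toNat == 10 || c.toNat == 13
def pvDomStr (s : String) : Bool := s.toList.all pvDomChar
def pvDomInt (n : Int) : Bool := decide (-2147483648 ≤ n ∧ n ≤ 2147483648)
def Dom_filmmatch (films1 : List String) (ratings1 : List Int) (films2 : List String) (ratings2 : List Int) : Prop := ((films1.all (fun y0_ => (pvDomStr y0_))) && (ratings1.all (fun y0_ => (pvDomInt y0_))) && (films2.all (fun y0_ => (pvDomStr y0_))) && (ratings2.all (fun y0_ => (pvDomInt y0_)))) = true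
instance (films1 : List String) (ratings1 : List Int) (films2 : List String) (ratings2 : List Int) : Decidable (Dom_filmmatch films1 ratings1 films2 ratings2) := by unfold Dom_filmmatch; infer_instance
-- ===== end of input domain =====

-- B replaces A's quadratic scan-with-deletion by a one-pass hash index (film → queue of ratings);
-- A empties its argument lists in place, B does not mutate them — the equivalence is about the return value.

-- ===== PORT A =====
-- A's inner while-loop: scan the long films list for x; on the first match return
-- (long_ratings[i], films with element i deleted, ratings with element i deleted).
-- Where Python would raise IndexError (a match at i ≥ len(ratings), ragged input excluded
-- by Pre_filmmatch) this returns none, conflated with the ordinary no-match exit.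
def findRem (x : String) : List String → List Int → Option (Int × List String × List Int)
  | [], _ => none
  | f :: ft, lr =>
    if f = x then
      match lr with
      | r :: rt => some (r, ft, rt)
      | [] => none          -- Python: ratings[i] IndexError; outside Pre_filmmatch
    else
      match lr with
      | [] => none          -- no ratings left: any later match would raise (outside Pre_); no match is none anyway
      | rr :: rrt =>
        match findRem x ft rrt with
        | none => none
        | some (p, ft', rt') => some (p, f :: ft', rr :: rt')

-- A's outer while-loop. Python's two branches are verbatim copies of each other with the
-- short/long roles of the lists swapped, so the loop is ported once and instantiated twice.
-- Accumulators: (finalfilms, short-side ratings, long-side ratings), each appended with ++[·] as in Python.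
def loopA : List String → List Int → List String → List Int →
    List String × List Int × List Int → List String × List Int × List Int
  | [], _, _, _, acc => acc
  | _ :: _, [], _, _, acc => acc     -- Python: del ratings[0] on empty raises; outside Pre_filmmatch
  | f :: sft, r :: srt, lf, lr, (ff, gs, gl) =>
    match findRem f lf lr with
    | some (p, lf', lr') => loopA sft srt lf' lr' (ff ++ [f], gs ++ [r], gl ++ [p])
    | none => loopA sft srt lf lr (ff, gs, gl)

def filmmatch (films1 : List String) (ratings1 : List Int) (films2 : List String) (ratings2 : List Int) : List String × List Int × List Int :=
  if films1.length < films2.length then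
    match loopA films1 ratings1 films2 ratings2 ([], [], []) with
    | (ff, fr1, fr2) => if ff = [] ∧ fr1 = [] ∧ fr2 = [] then (["-1"], [-1], [-1]) else (ff, fr1, fr2)
  else
    match loopA films2 ratings2 films1 ratings1 ([], [], []) with
    | (ff, fr2, fr1) => if ff = [] ∧ fr1 = [] ∧ fr2 = [] then (["-1"], [-1], [-1]) else (ff, fr1, fr2)

-- ===== PORT B =====
-- queues.setdefault(film, []).append(rating)  ==  queues[film] = queues.get(film, []) + [rating]
def buildQ (ps : List (String × Int)) : PySem.Dict String (List Int) :=
  ps.foldl (fun d p => d.modify p.1 [] (· ++ [p.2])) PySem.Dict.empty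

def loopB (q : PySem.Dict String (List Int)) :
    List (String × Int) → PySem.Dict String Nat →
    List String × List Int × List Int → List String × List Int × List Int
  | [], _, acc => acc
  | (f, r) :: ps, used, (ff, fs, fl) =>
    let lst := q.getD f []
    let u := used.getD f 0
    if u < lst.length then
      loopB q ps (used.insert f (u + 1)) (ff ++ [f], fs ++ [r], fl ++ [lst.getD u 0])
    else
      loopB q ps used (ff, fs, fl)

def filmmatch_alt (films1 : List String) (ratings1 : List Int) (films2 : List String) (ratings2 : List Int) : List String × List Int × List Int :=
  if films1.length < films2.length then
    match loopB (buildQ (films2.zip ratings2)) (films1.zip ratings1) PySem.Dict.empty ([], [], []) with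
    | (ff, fs, fl) => if ff = [] then (["-1"], [-1], [-1]) else (ff, fs, fl)
  else
    match loopB (buildQ (films1.zip ratings1)) (films2.zip ratings2) PySem.Dict.empty ([], [], []) with
    | (ff, fs, fl) => if ff = [] then (["-1"], [-1], [-1]) else (ff, fl, fs)

-- ===== PRECONDITION & SPEC =====
-- Pre_ excludes ragged inputs on which A raises IndexError: the shorter films list must not outrun its
-- ratings list (A deletes a short-side rating every iteration), and no film of the shorter list may occur
-- in the longer films list beyond its ratings list (a match there reads a missing rating). This is slightly
-- narrower than A's exact return domain: on a ragged long side A still returns when the surplus occurrence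
-- is never reached (e.g. an earlier duplicate matches first), and B returns the same value there.
def Pre_filmmatch (films1 : List String) (ratings1 : List Int) (films2 : List String) (ratings2 : List Int) : Prop :=
  if films1.length < films2.length then
    films1.length ≤ ratings1.length ∧ ∀ x ∈ films2.drop ratings2.length, x ∉ films1
  else
    films2.length ≤ ratings2.length ∧ ∀ x ∈ films1.drop ratings1.length, x ∉ films2
instance (films1 : List String) (ratings1 : List Int) (films2 : List String) (ratings2 : List Int) : Decidable (Pre_filmmatch films1 ratings1 films2 ratings2) := by unfold Pre_filmmatch; infer_instance

def pvWitness_filmmatch : List String × List Int × List String × List Int := (["a"], [1], ["a", "b"], [2, 3])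

def Spec_filmmatch (films1 : List String) (ratings1 : List Int) (films2 : List String) (ratings2 : List Int) (out : List String × List Int × List Int) : Prop := out = filmmatch_alt films1 ratings1 films2 ratings2
instance (films1 : List String) (ratings1 : List Int) (films2 : List String) (ratings2 : List Int) (out : List String × List Int × List Int) : Decidable (Spec_filmmatch films1 ratings1 films2 ratings2 out) := by unfold Spec_filmmatch; infer_instance

-- ===== CLAIM (what is proved, stated in full; the proofs are below) =====
def Claim_equal_filmmatch : Prop := ∀ (films1 : List String) (ratings1 : List Int) (films2 : List String) (ratings2 : List Int), Dom_filmmatch films1 ratings1 films2 ratings2 → Pre_filmmatch films1 ratings1 films2 ratings2 → Spec_filmmatch films1 ratings1 films2 ratings2 (filmmatch films1 ratings1 films2 ratings2)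

-- ===== LEMMAS AND PROOFS =====

-- the ratings of the occurrences of x in (lf, lr), in order
def occ (x : String) (lf : List String) (lr : List Int) : List Int :=
  ((lf.zip lr).filter (fun p => p.1 == x)).map (·.2)

theorem occ_cons_cons (x f : String) (r : Int) (ft : List String) (rt : List Int) :
    occ x (f :: ft) (r :: rt) = if f = x then r :: occ x ft rt else occ x ft rt := by
  by_cases h : f = x
  · simp [occ, h]
  · simp [occ, h]

theorem occ_of_not_mem (x : String) : ∀ (lf : List String) (lr : List Int), x ∉ lf → occ x lf lr = []
  | [], _, _ => rfl
  | _ :: _, [], _ => rfl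
  | f :: ft, r :: rt, h => by
    rw [occ_cons_cons]
    simp only [List.mem_cons, not_or] at h
    rw [if_neg (fun hh => h.1 hh.symm)]
    exact occ_of_not_mem x ft rt h.2

theorem findRem_none (x : String) : ∀ (lf : List String) (lr : List Int), x ∉ lf → findRem x lf lr = none
  | [], _, _ => rfl
  | f :: ft, lr, h => by
    simp only [List.mem_cons, not_or] at h
    have hfx : ¬ f = x := fun hh => h.1 hh.symm
    cases lr with
    | nil => simp [findRem, hfx]
    | cons rr rrt => simp [findRem, hfx, findRem_none x ft rrt h.2]

theorem findRem_spec (x : String) : ∀ (lf : List String) (lr : List Int),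
    x ∈ lf → x ∉ lf.drop lr.length →
    ∃ p lf' lr', findRem x lf lr = some (p, lf', lr') ∧
      occ x lf lr = p :: occ x lf' lr' ∧
      (∀ y, y ≠ x → occ y lf' lr' = occ y lf lr) ∧
      lf'.drop lr'.length = lf.drop lr.length
  | [], _, hm, _ => absurd hm (List.not_mem_nil)
  | f :: ft, lr, hm, hd => by
    by_cases hf : f = x
    · subst hf
      cases lr with
      | nil =>
        simp only [List.length_nil, List.drop_zero] at hd
        exact absurd hm hd
      | cons r rt =>
        refine ⟨r, ft, rt, by simp [findRem], ?_, ?_, ?_⟩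
        · rw [occ_cons_cons, if_pos rfl]
        · intro y hy
          rw [occ_cons_cons, if_neg (fun h => hy h.symm)]
        · simp
    · have hm' : x ∈ ft := by
        rcases List.mem_cons.mp hm with h | h
        · exact absurd h.symm hf
        · exact h
      cases lr with
      | nil =>
        simp only [List.length_nil, List.drop_zero] at hd
        exact absurd hm hd
      | cons rr rrt =>
        have hd' : x ∉ ft.drop rrt.length := by simpa using hd
        obtain ⟨p, ft', rt', heq, hocc, hoth, hdrop⟩ := findRem_spec x ft rrt hm' hd'
        refine ⟨p, f :: ft', rr :: rt', by simp [findRem, hf, heq], ?_, ?_, ?_⟩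
        · rw [occ_cons_cons, if_neg hf, occ_cons_cons, if_neg hf, hocc]
        · intro y hy
          rw [occ_cons_cons, occ_cons_cons, hoth y hy]
        · simpa using hdrop

theorem getD_of_drop_cons {q t : List Int} {u : Nat} {p : Int}
    (h : q.drop u = p :: t) : u < q.length ∧ q.getD u 0 = p := by
  have h0 : q[u]? = some p := by
    have h1 := congrArg (fun l => l[0]?) h
    simpa [List.getElem?_drop] using h1
  constructor
  · exact (List.getElem?_eq_some_iff.mp h0).1
  · simp [List.getD_eq_getElem?_getD, h0]

theorem loop_eq (Q : PySem.Dict String (List Int)) :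
    ∀ (sf : List String) (sr : List Int) (lf : List String) (lr : List Int)
      (used : PySem.Dict String Nat) (ff : List String) (gs gl : List Int),
      sf.length ≤ sr.length →
      (∀ x ∈ sf, x ∉ lf.drop lr.length) →
      (∀ x ∈ sf, occ x lf lr = (Q.getD x []).drop (used.getD x 0)) →
      loopA sf sr lf lr (ff, gs, gl) = loopB Q (sf.zip sr) used (ff, gs, gl)
  | [], sr, lf, lr, used, ff, gs, gl, _, _, _ => by simp [loopA, loopB]
  | f :: sft, [], lf, lr, used, ff, gs, gl, hlen, _, _ => by simp at hlen
  | f :: sft, r :: srt, lf, lr, used, ff, gs, gl, hlen, hdrop, hocc => by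
    have hq : occ f lf lr = (Q.getD f []).drop (used.getD f 0) := hocc f (List.mem_cons_self)
    by_cases hm : f ∈ lf
    · obtain ⟨p, lf', lr', heq, hc, hoth, hpres⟩ :=
        findRem_spec f lf lr hm (hdrop f (List.mem_cons_self))
      rw [hc] at hq
      obtain ⟨hu, hgd⟩ := getD_of_drop_cons hq.symm
      have hdrop1 : (Q.getD f []).drop (used.getD f 0 + 1) = occ f lf' lr' := by
        have h2 := congrArg List.tail hq
        simp only [List.tail_cons] at h2
        rw [← List.tail_drop]
        exact h2.symm
      have IH := loop_eq Q sft srt lf' lr' (used.insert f (used.getD f 0 + 1))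
        (ff ++ [f]) (gs ++ [r]) (gl ++ [p])
        (by simpa using Nat.le_of_succ_le_succ hlen)
        (fun x hx => by rw [hpres]; exact hdrop x (List.mem_cons_of_mem f hx))
        (fun x hx => by
          rw [PySem.Dict.getD_insert]
          by_cases hxf : x = f
          · subst hxf; rw [if_pos rfl, hdrop1]
          · rw [if_neg hxf, hoth x hxf]
            exact hocc x (List.mem_cons_of_mem f hx))
      simp only [loopA, heq, List.zip_cons_cons, loopB, hu, if_pos, hgd]
      rw [IH]
    · have hnone := findRem_none f lf lr hm
      have hnil : occ f lf lr = [] := occ_of_not_mem f lf lr hm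
      have hge : ¬ (used.getD f 0 < (Q.getD f []).length) := by
        rw [hnil] at hq
        have := List.drop_eq_nil_iff.mp hq.symm
        omega
      have IH := loop_eq Q sft srt lf lr used ff gs gl
        (by simpa using Nat.le_of_succ_le_succ hlen)
        (fun x hx => hdrop x (List.mem_cons_of_mem f hx))
        (fun x hx => hocc x (List.mem_cons_of_mem f hx))
      simp only [loopA, hnone, List.zip_cons_cons, loopB, hge]
      rw [IH]
      simp

theorem loopB_lens (Q : PySem.Dict String (List Int)) :
    ∀ (ps : List (String × Int)) (used : PySem.Dict String Nat)
      (ff : List String) (fs fl : List Int),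
      ff.length = fs.length → ff.length = fl.length →
      (loopB Q ps used (ff, fs, fl)).1.length = (loopB Q ps used (ff, fs, fl)).2.1.length ∧
      (loopB Q ps used (ff, fs, fl)).1.length = (loopB Q ps used (ff, fs, fl)).2.2.length
  | [], used, ff, fs, fl, h1, h2 => ⟨h1, h2⟩
  | (f, r) :: ps, used, ff, fs, fl, h1, h2 => by
    by_cases hu : used.getD f 0 < (Q.getD f []).length
    · simp only [loopB, hu, if_pos]
      exact loopB_lens Q ps _ _ _ _ (by simp [h1]) (by simp [h2])
    · simp only [loopB, hu, if_neg, not_false_iff]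
      exact loopB_lens Q ps used ff fs fl h1 h2

-- the initial state of the main induction: empty `used` dict, queues built by B's first pass
theorem init_occ (lf : List String) (lr : List Int) (x : String) :
    occ x lf lr = ((buildQ (lf.zip lr)).getD x []).drop ((PySem.Dict.empty : PySem.Dict String Nat).getD x 0) := by
  rw [buildQ, PySem.Dict.getD_foldl_modify_append]
  simp [occ, PySem.Dict.getD_empty]

theorem branch_eq (sf : List String) (sr : List Int) (lf : List String) (lr : List Int)
    (hlen : sf.length ≤ sr.length) (hdrop : ∀ x ∈ lf.drop lr.length, x ∉ sf) :
    loopA sf sr lf lr ([], [], []) =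
      loopB (buildQ (lf.zip lr)) (sf.zip sr) PySem.Dict.empty ([], [], []) := by
  exact loop_eq (buildQ (lf.zip lr)) sf sr lf lr PySem.Dict.empty [] [] [] hlen
    (fun x hx hmem => hdrop x hmem hx)
    (fun x _ => init_occ lf lr x)

-- ===== VERDICT (by name: the statement is the Claim_ definition above) =====
theorem filmmatch_spec : Claim_equal_filmmatch := by
  intro films1 ratings1 films2 ratings2 _ hpre
  unfold Spec_filmmatch filmmatch filmmatch_alt
  unfold Pre_filmmatch at hpre
  by_cases hlt : films1.length < films2.length
  · rw [if_pos hlt] at hpre ⊢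
    rw [if_pos hlt]
    obtain ⟨hlen, hdrop⟩ := hpre
    rw [branch_eq films1 ratings1 films2 ratings2 hlen hdrop]
    rcases hres : loopB (buildQ (films2.zip ratings2)) (films1.zip ratings1) PySem.Dict.empty ([], [], []) with ⟨ff, fs, fl⟩
    have hl := loopB_lens (buildQ (films2.zip ratings2)) (films1.zip ratings1) PySem.Dict.empty [] [] [] rfl rfl
    rw [hres] at hl
    simp only at hl
    by_cases hff : ff = []
    · subst hff
      have hfs : fs = [] := List.length_eq_zero_iff.mp (by simpa using hl.1.symm)
      have hfl : fl = [] := List.length_eq_zero_iff.mp (by simpa using hl.2.symm)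
      subst hfs; subst hfl
      simp
    · simp [hff]
  · rw [if_neg hlt] at hpre ⊢
    rw [if_neg hlt]
    obtain ⟨hlen, hdrop⟩ := hpre
    rw [branch_eq films2 ratings2 films1 ratings1 hlen hdrop]
    rcases hres : loopB (buildQ (films1.zip ratings1)) (films2.zip ratings2) PySem.Dict.empty ([], [], []) with ⟨ff, fs, fl⟩
    have hl := loopB_lens (buildQ (films1.zip ratings1)) (films2.zip ratings2) PySem.Dict.empty [] [] [] rfl rfl
    rw [hres] at hl
    simp only at hl
    by_cases hff : ff = []
    · subst hff
      have hfs : fs = [] := List.length_eq_zero_iff.mp (by simpa using hl.1.symm)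
      have hfl : fl = [] := List.length_eq_zero_iff.mp (by simpa using hl.2.symm)
      subst hfs; subst hfl
      simp
    · simp [hff]
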